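-- pv_equiv track=rewrite | github.com/SlicedPotatoes/France_IOI | Niveau 3/8 – Récursivité/3 - Fractale triangle de Sierpinski.py | fractale
-- ===== SOURCE A (Python) =====
-- def fractale(grid, n):
--     if len(grid) == n:
--         return grid
--     if n == 1:
--         return ['#']
--     _grid = [[0 for _ in range(len(grid) * 2)] for _ in range(len(grid) * 2)]
--     for i in range(len(grid)):
--         for j in range(len(grid)):
--             if grid[i][j] == '#':
--                 _grid[i*2][j*2] = '#'
--                 _grid[i*2][j*2+1] = '#'
--                 _grid[i*2+1][j*2] = '#'
--             else:
--                 _grid[i*2][j*2] = ' '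
--                 _grid[i*2][j*2+1] = ' '
--                 _grid[i*2+1][j*2] = ' '
--             _grid[i*2+1][j*2+1] = ' '
--     return fractale(_grid, n)
-- ===== SOURCE B (Python) =====
-- def fractale(grid, n):
--     while len(grid) != n:
--         if not grid or len(grid) > n:
--             raise ValueError("a grid of %d rows cannot be doubled to %d rows" % (len(grid), n))
--         nxt = []
--         for row in grid:
--             nxt.append([c for cell in row for c in (('#', '#') if cell == '#' else (' ', ' '))])
--             nxt.append([c for cell in row for c in (('#', ' ') if cell == '#' else (' ', ' '))])
--         grid = nxt
--     return grid
-- ===== Notes on version B (the rewrite author's own statement) =====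
-- stated objective: simpler
-- what changed: The tail recursion over doubled grids becomes a while-loop that raises ValueError as soon as the size can never reach n, and the preallocated 2Lx2L grid filled cell-by-cell through index arithmetic becomes per-row comprehensions emitting each row's two expanded rows; …
-- outside the precondition, e.g. on fractale([[' ', ' '], [' ', ' ']], 1): A returns ['#'], B raises ValueError
import Mathlib
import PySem

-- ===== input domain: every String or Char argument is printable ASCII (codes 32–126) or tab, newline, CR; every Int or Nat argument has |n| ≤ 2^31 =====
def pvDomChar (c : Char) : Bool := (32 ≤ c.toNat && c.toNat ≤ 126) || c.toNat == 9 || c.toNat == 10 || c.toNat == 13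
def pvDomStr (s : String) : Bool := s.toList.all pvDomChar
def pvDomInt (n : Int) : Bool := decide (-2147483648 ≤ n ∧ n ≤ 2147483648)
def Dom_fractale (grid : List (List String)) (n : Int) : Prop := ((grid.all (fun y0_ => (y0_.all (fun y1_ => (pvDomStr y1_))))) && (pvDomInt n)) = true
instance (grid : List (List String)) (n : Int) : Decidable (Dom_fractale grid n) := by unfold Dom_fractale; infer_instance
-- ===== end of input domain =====

-- B replaces A's tail recursion with a while-loop and A's index-mutated preallocated
-- 2Lx2L grid with per-row comprehensions emitting each row's two expanded rows.

-- ===== PORT A =====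
-- The Python preallocates a (2L)x(2L) grid and assigns every cell (r, c) exactly once;
-- this map writes the value each cell receives (the r%2/c%2 pattern from grid[r/2][c/2]).
def expandA (grid : List (List String)) : List (List String) :=
  (List.range (grid.length * 2)).map (fun r =>
    (List.range (grid.length * 2)).map (fun c =>
      if r % 2 = 1 ∧ c % 2 = 1 then " "
      else if (grid.getD (r / 2) []).getD (c / 2) "" = "#" then "#" else " "))

-- A's recursion terminates only when the grid size reaches n; fuel 34 covers every
-- input admitted by Pre_ (within Dom, |n| ≤ 2^31 allows at most 31 doublings).
-- The Python's 'n == 1' branch returns the flat list ['#'], which is not a value of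
-- the declared return type List (List String); Pre_ excludes it (the placeholder
-- [["#"]] is never claimed about).
def fractaleFuel : Nat → List (List String) → Int → List (List String)
  | 0, grid, _ => grid
  | f + 1, grid, n =>
    if (grid.length : Int) = n then grid
    else if n = 1 then [["#"]]
    -- totality guard only: here the Python recurses until RecursionError
    -- (the size only grows and can never reach n); never reached on Pre_ inputs
    else if n < (grid.length : Int) * 2 then grid
    else fractaleFuel f (expandA grid) n

def fractale (grid : List (List String)) (n : Int) : List (List String) :=
  fractaleFuel 34 grid n

-- ===== PORT B =====
def topRow (row : List String) : List String :=
  row.flatMap (fun c => if c = "#" then ["#", "#"] else [" ", " "])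

def botRow (row : List String) : List String :=
  row.flatMap (fun c => if c = "#" then ["#", " "] else [" ", " "])

-- one doubling step: each row contributes its two expanded rows
def stepB (grid : List (List String)) : List (List String) :=
  grid.flatMap (fun row => [topRow row, botRow row])

-- Source B's 'while len(grid) != n' loop, as fuel recursion (fuel 34 covers every Pre_
-- input: within Dom at most 31 doublings occur, so the fuel never runs out there).
def loopB : Nat → List (List String) → Int → List (List String)
  | 0, grid, _ => grid
  | f + 1, grid, n =>
    if (grid.length : Int) = n then grid
    -- here Source B raises ValueError (the size can never reach n); never reached on Pre_ inputs
    else if grid = [] ∨ n < (grid.length : Int) then grid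
    else loopB f (stepB grid) n

def fractale_alt (grid : List (List String)) (n : Int) : List (List String) :=
  loopB 34 grid n

-- ===== PRECONDITION & SPEC =====
-- Pre_ excludes: inputs A's doubling can never bring to size n (A raises
-- RecursionError); grids with a row shorter than the grid's height (A raises
-- IndexError); the 'n == 1' branch whose flat ['#'] is not a value of the declared
-- List (List String) type; and non-square grids with longer rows, where A's silent
-- column truncation and B's whole-row expansion are equally defensible corner choices.
-- (The bound k ≤ 32 only makes the ∃ decidable: within Dom, |n| ≤ 2^31 and len ≥ 1
-- force k ≤ 31, and a len = 0 grid gives n = 0, the first disjunct — no input in Dom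
-- is lost to it.)
def Pre_fractale (grid : List (List String)) (n : Int) : Prop :=
  (grid.length : Int) = n ∨
  ((∀ row ∈ grid, row.length = grid.length) ∧
    ∃ k ≤ 32, 0 < k ∧ n = (grid.length : Int) * 2 ^ k)
instance (grid : List (List String)) (n : Int) : Decidable (Pre_fractale grid n) := by
  unfold Pre_fractale; infer_instance

def pvWitness_fractale : List (List String) × Int := ([["#"]], 2)

def Spec_fractale (grid : List (List String)) (n : Int) (out : List (List String)) : Prop := out = fractale_alt grid n
instance (grid : List (List String)) (n : Int) (out : List (List String)) : Decidable (Spec_fractale grid n out) := by unfold Spec_fractale; infer_instance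

-- ===== CLAIM (what is proved, stated in full; the proofs are below) =====
def Claim_equal_fractale : Prop := ∀ (grid : List (List String)) (n : Int), Dom_fractale grid n → Pre_fractale grid n → Spec_fractale grid n (fractale grid n)

-- ===== LEMMAS AND PROOFS =====

lemma map_range_double {α : Type} (f : Nat → α) (n : Nat) :
    (List.range (n * 2)).map f = (List.range n).flatMap (fun i => [f (i * 2), f (i * 2 + 1)]) := by
  induction n with
  | zero => simp
  | succ m ih =>
    have h : (m + 1) * 2 = (m * 2 + 1) + 1 := by ring
    rw [h, List.range_succ, List.range_succ, List.range_succ]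
    simp [ih]

lemma map_getD_range {α : Type} (xs : List α) (d : α) :
    (List.range xs.length).map (fun i => xs.getD i d) = xs := by
  apply List.ext_getElem
  · simp
  · intro i h1 h2
    simp [List.getD, List.getElem?_eq_getElem h2]

lemma flatMap_getD_range {α β : Type} (xs : List α) (d : α) (g : α → List β) :
    (List.range xs.length).flatMap (fun i => g (xs.getD i d)) = xs.flatMap g := by
  conv_rhs => rw [← map_getD_range xs d]
  rw [List.flatMap_map]

lemma even_row (row : List String) :
    (List.range (row.length * 2)).map (fun c => if row.getD (c / 2) "" = "#" then "#" else " ")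
      = topRow row := by
  rw [map_range_double, topRow, ← flatMap_getD_range row "" (fun c => if c = "#" then ["#", "#"] else [" ", " "])]
  apply List.flatMap_congr
  intro j _
  have d0 : j * 2 / 2 = j := by omega
  have d1 : (j * 2 + 1) / 2 = j := by omega
  rw [d0, d1]
  by_cases h : row[j]?.getD "" = "#" <;> simp [List.getD, h]

lemma odd_row (row : List String) :
    (List.range (row.length * 2)).map
        (fun c => if c % 2 = 1 then " " else if row.getD (c / 2) "" = "#" then "#" else " ")
      = botRow row := by
  rw [map_range_double, botRow, ← flatMap_getD_range row "" (fun c => if c = "#" then ["#", " "] else [" ", " "])]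
  apply List.flatMap_congr
  intro j _
  have m0 : j * 2 % 2 = 0 := by omega
  have m1 : (j * 2 + 1) % 2 = 1 := by omega
  have d0 : j * 2 / 2 = j := by omega
  have d1 : (j * 2 + 1) / 2 = j := by omega
  rw [m0, m1, d0, d1]
  by_cases h : row[j]?.getD "" = "#" <;> simp [List.getD, h]

lemma expand_eq (grid : List (List String))
    (hsq : ∀ row ∈ grid, row.length = grid.length) : expandA grid = stepB grid := by
  unfold expandA stepB
  rw [map_range_double, ← flatMap_getD_range grid []
    (fun row => [topRow row, botRow row])]
  apply List.flatMap_congr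
  intro i hi
  rw [List.mem_range] at hi
  have hmem : grid.getD i [] ∈ grid := by
    rw [List.getD_eq_getElem grid [] hi]; exact List.getElem_mem hi
  have hlen : (grid.getD i []).length = grid.length := hsq _ hmem
  congr 1
  · have hc : ∀ c ∈ List.range (grid.length * 2),
        (if i * 2 % 2 = 1 ∧ c % 2 = 1 then " "
         else if (grid.getD (i * 2 / 2) []).getD (c / 2) "" = "#" then "#" else " ")
        = (if (grid.getD i []).getD (c / 2) "" = "#" then "#" else " ") := by
      intro c hcr
      have d0 : i * 2 / 2 = i := by omega
      rw [if_neg (by omega), d0]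
    have he := even_row (grid.getD i [])
    rw [hlen] at he
    rw [List.map_congr_left hc, he]
  · congr 1
    have hc : ∀ c ∈ List.range (grid.length * 2),
        (if (i * 2 + 1) % 2 = 1 ∧ c % 2 = 1 then " "
         else if (grid.getD ((i * 2 + 1) / 2) []).getD (c / 2) "" = "#" then "#" else " ")
        = (if c % 2 = 1 then " "
           else if (grid.getD i []).getD (c / 2) "" = "#" then "#" else " ") := by
      intro c hcr
      have d1 : (i * 2 + 1) / 2 = i := by omega
      rw [d1]
      by_cases hc2 : c % 2 = 1
      · rw [if_pos ⟨by omega, hc2⟩, if_pos hc2]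
      · rw [if_neg (by omega), if_neg hc2]
    have ho := odd_row (grid.getD i [])
    rw [hlen] at ho
    rw [List.map_congr_left hc, ho]

lemma length_topRow (row : List String) : (topRow row).length = row.length * 2 := by
  unfold topRow
  induction row with
  | nil => simp
  | cons c cs ih => by_cases h : c = "#" <;> simp [h, ih] <;> ring

lemma length_botRow (row : List String) : (botRow row).length = row.length * 2 := by
  unfold botRow
  induction row with
  | nil => simp
  | cons c cs ih => by_cases h : c = "#" <;> simp [h, ih] <;> ring

lemma length_flatMap_pair {α β : Type} (xs : List α) (f g : α → List β) :
    (xs.flatMap (fun x => [f x, g x])).length = xs.length * 2 := by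
  induction xs with
  | nil => simp
  | cons x rest ih => simp [ih]; ring

lemma length_stepB (grid : List (List String)) : (stepB grid).length = grid.length * 2 := by
  unfold stepB
  exact length_flatMap_pair grid _ _

lemma stepB_rows (grid : List (List String))
    (hsq : ∀ row ∈ grid, row.length = grid.length) :
    ∀ row ∈ stepB grid, row.length = (stepB grid).length := by
  intro row hrow
  rw [length_stepB]
  unfold stepB at hrow
  simp only [List.mem_flatMap] at hrow
  obtain ⟨r, hr, hmem⟩ := hrow
  have hge := hsq r hr
  simp only [List.mem_cons, List.not_mem_nil, or_false] at hmem
  rcases hmem with h | h <;> subst h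
  · rw [length_topRow, hge]
  · rw [length_botRow, hge]

lemma loop_eq : ∀ (k f : Nat) (grid : List (List String)) (n : Int),
    (∀ row ∈ grid, row.length = grid.length) →
    n = (grid.length : Int) * 2 ^ k → k ≤ f →
    fractaleFuel f grid n = loopB f grid n := by
  intro k
  induction k with
  | zero =>
    intro f grid n _ hn _
    cases f with
    | zero => rfl
    | succ f' =>
      have h : (grid.length : Int) = n := by simp [hn]
      simp [fractaleFuel, loopB, h]
  | succ k ih =>
    intro f grid n hsq hn hkf
    cases f with
    | zero => omega
    | succ f' =>
      by_cases heq : (grid.length : Int) = n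
      · simp [fractaleFuel, loopB, heq]
      · have hL1 : (1:Int) ≤ (grid.length : Int) := by
          rcases Nat.eq_zero_or_pos grid.length with h0 | h0
          · exfalso; apply heq; rw [h0] at hn ⊢; simp [hn]
          · exact_mod_cast h0
        have h2 : (2:Int) ≤ 2 ^ (k + 1) := by
          calc (2:Int) = 2 ^ 1 := by norm_num
          _ ≤ 2 ^ (k + 1) := by apply pow_le_pow_right₀ <;> omega
        have hn1 : n ≠ 1 := by nlinarith
        have hge : ¬ n < (grid.length : Int) * 2 := by
          have : (grid.length : Int) * 2 ≤ (grid.length : Int) * 2 ^ (k + 1) := by nlinarith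
          omega
        have hgB : ¬ (grid = [] ∨ n < (grid.length : Int)) := by
          rintro (h | h)
          · rw [h] at hL1; norm_num at hL1
          · omega
        simp only [fractaleFuel, loopB, if_neg heq, if_neg hn1, if_neg hge, if_neg hgB]
        rw [expand_eq grid hsq]
        apply ih
        · exact stepB_rows grid hsq
        · rw [length_stepB]; push_cast; rw [hn]; ring
        · omega

-- ===== VERDICT (by name: the statement is the Claim_ definition above) =====
theorem fractale_spec : Claim_equal_fractale := by
  intro grid n _ hpre
  unfold Spec_fractale fractale fractale_alt
  rcases hpre with h | ⟨hsq, k, hk32, hk0, hn⟩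
  · simp [fractaleFuel, loopB, h]
  · exact loop_eq k 34 grid n hsq hn (by omega)
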